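-- pv_equiv track=rewrite | github.com/yinkeet/chimera | chimera/mongo_helpers.py | create_sort_query
-- ===== SOURCE A (Python) =====
-- def create_sort_query(fields):
--     """Creates a sort query for mongo aggregation"""
--     results=[]
--     marker = set()
--
--     for field in fields:
--         lowercased_value = field.lower()
--         if lowercased_value not in marker:
--             marker.add(lowercased_value)
--             results.append(field)
--
--     return { (field.lower()):(1 if field.isupper() else -1) for field in results }
-- ===== SOURCE B (Python) =====
-- def create_sort_query(fields):
--     """Creates a sort query for mongo aggregation"""
--     result = {}
--     remaining = list(fields)
--     while remaining:
--         first = remaining[0]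
--         key = first.lower()
--         result[key] = 1 if first.isupper() else -1
--         remaining = [f for f in remaining[1:] if f.lower() != key]
--     return result
-- ===== Notes on version B (the rewrite author's own statement) =====
-- stated objective: alternative
-- what changed: Replaces A's seen-set dedup pass plus dict comprehension with an eliminative worklist: repeatedly take the head field, emit its entry, and filter every later field with the same lowercase key out of the remaining list, so no marker set and no membership test against accumulated state exist.
import Mathlib
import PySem

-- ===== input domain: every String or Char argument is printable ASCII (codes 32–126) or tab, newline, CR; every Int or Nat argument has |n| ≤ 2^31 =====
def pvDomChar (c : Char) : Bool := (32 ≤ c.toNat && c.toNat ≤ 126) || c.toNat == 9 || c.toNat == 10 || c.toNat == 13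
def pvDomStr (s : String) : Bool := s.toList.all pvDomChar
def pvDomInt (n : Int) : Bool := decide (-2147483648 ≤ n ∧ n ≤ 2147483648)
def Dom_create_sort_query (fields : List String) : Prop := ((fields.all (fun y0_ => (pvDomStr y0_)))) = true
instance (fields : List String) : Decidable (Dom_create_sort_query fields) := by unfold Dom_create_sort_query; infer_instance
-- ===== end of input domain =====

-- B replaces A's seen-set dedup pass + dict comprehension with an eliminative worklist
-- (emit the head's entry, filter its lowercase-duplicates out of the rest); alternative decomposition, not claimed faster.

-- Python str.isupper(): at least one cased character and no lowercase one (exact on the ASCII domain; cased = A-Z/a-z there)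
def pyStrIsupper (s : String) : Bool :=
  s.toList.any PySem.Chars.isupper && !(s.toList.any PySem.Chars.islower)

-- ===== PORT A =====
-- the for-loop building (marker, results)
def csqLoopA (fields : List String) : PySem.Set String × List String :=
  fields.foldl (fun acc field =>
    let lowercased_value := PySem.Str.lower field
    if PySem.Set.contains acc.1 lowercased_value then acc
    else (PySem.Set.add acc.1 lowercased_value, acc.2 ++ [field]))
    (PySem.Set.empty, [])

def create_sort_query (fields : List String) : List (String × Int) :=
  ((csqLoopA fields).2.foldl
    (fun d field => d.insert (PySem.Str.lower field) (if pyStrIsupper field then (1 : Int) else -1))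
    PySem.Dict.empty).items

-- ===== PORT B =====
-- the while loop: emit the head's entry, drop every later field with the same lowercase key
def csqLoopB (remaining : List String) (result : PySem.Dict String Int) : PySem.Dict String Int :=
  match remaining with
  | [] => result
  | first :: tl =>
    let key := PySem.Str.lower first
    csqLoopB (tl.filter (fun f => PySem.Str.lower f != key))
      (result.insert key (if pyStrIsupper first then (1 : Int) else -1))
termination_by remaining.length
decreasing_by
  simpa using Nat.lt_succ_of_le (List.length_filter_le _ _)

def create_sort_query_alt (fields : List String) : List (String × Int) :=
  (csqLoopB fields PySem.Dict.empty).items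

-- ===== PRECONDITION & SPEC =====
def Spec_create_sort_query (fields : List String) (out : List (String × Int)) : Prop := out = create_sort_query_alt fields
instance (fields : List String) (out : List (String × Int)) : Decidable (Spec_create_sort_query fields out) := by unfold Spec_create_sort_query; infer_instance

-- ===== CLAIM (what is proved, stated in full; the proofs are below) =====
def Claim_equal_create_sort_query : Prop := ∀ (fields : List String), Dom_create_sort_query fields → Spec_create_sort_query fields (create_sort_query fields)

-- ===== LEMMAS AND PROOFS =====

-- the common characterisation: filter-style first-occurrence dedup
def dedupF (l : List String) : List String :=
  match l with
  | [] => []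
  | f :: tl => f :: dedupF (tl.filter (fun g => PySem.Str.lower g != PySem.Str.lower f))
termination_by l.length
decreasing_by
  simpa using Nat.lt_succ_of_le (List.length_filter_le _ _)

def csqPair (f : String) : String × Int :=
  (PySem.Str.lower f, if pyStrIsupper f then (1 : Int) else -1)

theorem mem_dedupF (l : List String) : ∀ x ∈ dedupF l, x ∈ l := by
  induction hn : l.length using Nat.strong_induction_on generalizing l with
  | _ n ih =>
    cases l with
    | nil => intro x hx; simp [dedupF] at hx
    | cons f tl =>
      intro x hx
      rw [dedupF] at hx
      rcases List.mem_cons.mp hx with h | h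
      · simp [h]
      · have hlt : (tl.filter (fun g => PySem.Str.lower g != PySem.Str.lower f)).length < n := by
          subst hn; exact Nat.lt_succ_of_le (List.length_filter_le _ _)
        exact List.mem_cons_of_mem _
          (List.mem_of_mem_filter (ih _ hlt _ rfl x h))

theorem nodup_lower_dedupF (l : List String) :
    ((dedupF l).map PySem.Str.lower).Nodup := by
  induction hn : l.length using Nat.strong_induction_on generalizing l with
  | _ n ih =>
    cases l with
    | nil => simp [dedupF]
    | cons f tl =>
      rw [dedupF]
      simp only [List.map_cons, List.nodup_cons]
      have hlt : (tl.filter (fun g => PySem.Str.lower g != PySem.Str.lower f)).length < n := by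
        subst hn; exact Nat.lt_succ_of_le (List.length_filter_le _ _)
      refine ⟨?_, ih _ hlt _ rfl⟩
      intro hmem
      rcases List.mem_map.mp hmem with ⟨g, hg, hlow⟩
      have := List.of_mem_filter (mem_dedupF _ g hg)
      simp [hlow] at this

-- A's loop yields exactly dedupF of the fields whose key the marker has not yet seen
theorem loopA_eq (fields : List String) :
    ∀ (marker : PySem.Set String) (results : List String),
    (fields.foldl (fun acc field =>
      let lowercased_value := PySem.Str.lower field
      if PySem.Set.contains acc.1 lowercased_value then acc
      else (PySem.Set.add acc.1 lowercased_value, acc.2 ++ [field]))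
      (marker, results)).2
    = results ++ dedupF (fields.filter (fun g => !(PySem.Set.contains marker (PySem.Str.lower g)))) := by
  induction fields with
  | nil => intro marker results; simp [dedupF]
  | cons f fs ih =>
    intro marker results
    by_cases h : PySem.Set.contains marker (PySem.Str.lower f) = true
    · simp only [List.foldl_cons, h, if_true, List.filter_cons, Bool.not_true,
        Bool.false_eq_true, if_false]
      rw [ih marker results]
    · rw [Bool.not_eq_true] at h
      simp only [List.foldl_cons, h, Bool.false_eq_true, if_false, List.filter_cons,
        Bool.not_false, if_true]
      rw [ih (PySem.Set.add marker (PySem.Str.lower f)) (results ++ [f])]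
      have hfilt : fs.filter (fun g => !(PySem.Set.contains (PySem.Set.add marker (PySem.Str.lower f)) (PySem.Str.lower g)))
          = (fs.filter (fun g => !(PySem.Set.contains marker (PySem.Str.lower g)))).filter
              (fun g => PySem.Str.lower g != PySem.Str.lower f) := by
        rw [List.filter_filter]
        apply List.filter_congr
        intro g _
        by_cases hg : PySem.Str.lower g = PySem.Str.lower f
        · simp [hg, PySem.Set.mem_add]
        · simp [PySem.Set.mem_add, hg]
      rw [hfilt, dedupF]
      simp

-- B's loop appends dedupF's pairs to a dict whose keys are all fresh
theorem loopB_items (l : List String) :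
    ∀ (d : PySem.Dict String Int),
    (∀ f ∈ l, d.contains (PySem.Str.lower f) = false) →
    (csqLoopB l d).items = d.items ++ (dedupF l).map csqPair := by
  induction hn : l.length using Nat.strong_induction_on generalizing l with
  | _ n ih =>
    cases l with
    | nil => intro d _; simp [csqLoopB, dedupF]
    | cons f tl =>
      intro d hfresh
      rw [csqLoopB, dedupF]
      have hfirst : d.contains (PySem.Str.lower f) = false := hfresh f (by simp)
      have hfresh' : ∀ g ∈ tl.filter (fun g => PySem.Str.lower g != PySem.Str.lower f),
          (d.insert (PySem.Str.lower f) (if pyStrIsupper f then (1 : Int) else -1)).contains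
            (PySem.Str.lower g) = false := by
        intro g hg
        have hne := List.of_mem_filter hg
        have hmem := List.mem_of_mem_filter hg
        rw [PySem.Dict.contains_insert]
        simp only [bne_iff_ne, ne_eq] at hne
        simp [hne, hfresh g (List.mem_cons_of_mem _ hmem)]
      have hlt : (tl.filter (fun g => PySem.Str.lower g != PySem.Str.lower f)).length < n := by
        subst hn; exact Nat.lt_succ_of_le (List.length_filter_le _ _)
      rw [ih _ hlt _ rfl _ hfresh']
      rw [PySem.Dict.items_insert_of_not_contains _ _ hfirst]
      simp [csqPair]

-- A's result is dedupF's pairs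
theorem portA_eq (fields : List String) :
    create_sort_query fields = (dedupF fields).map csqPair := by
  unfold create_sort_query csqLoopA
  rw [loopA_eq fields PySem.Set.empty []]
  have hall : fields.filter (fun g => !(PySem.Set.contains PySem.Set.empty (PySem.Str.lower g))) = fields := by
    apply List.filter_eq_self.mpr
    intro g _
    rfl
  rw [hall]
  simp only [List.nil_append]
  rw [PySem.Dict.items_foldl_insert_fresh
      (dedupF fields)
      (fun field => PySem.Str.lower field)
      (fun field => if pyStrIsupper field then (1 : Int) else -1)
      PySem.Dict.empty
      (fun a _ => rfl)
      (nodup_lower_dedupF fields)]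
  simp [csqPair, PySem.Dict.empty]

-- ===== VERDICT (by name: the statement is the Claim_ definition above) =====
theorem create_sort_query_spec : Claim_equal_create_sort_query := by
  intro fields _
  unfold Spec_create_sort_query create_sort_query_alt
  rw [portA_eq, loopB_items fields PySem.Dict.empty (fun f _ => rfl)]
  simp [PySem.Dict.empty]
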